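-- pv_equiv track=rewrite | github.com/CGL-Deeplearning/FRIDAY | call_variants.py | get_site_record
-- ===== SOURCE A (Python) =====
-- DEL = 3
--
-- HET = 1
--
-- def get_site_record(all_records):
--     site_ref = ''
--     site_alts = []
--     site_quals = []
--     site_gqs = []
--     site_genotypes = []
--     for record in all_records:
--         ref_seq, alt_seq, genotype, qual, gq, rec_type = record
--         site_gqs.append(gq)
--         site_quals.append(qual)
--         site_genotypes.append(genotype)
--         if rec_type == DEL:
--             site_ref = ref_seq
--         elif site_ref == '':
--             site_ref = ref_seq
--
--     for record in all_records:
--         ref_seq, alt_seq, genotype, qual, gq, rec_type = record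
--         if ref_seq != site_ref and len(site_ref) > 1:
--             alt_seq += ref_seq[len(ref_seq):]
--         site_alts.append(alt_seq)
--     site_gq = min(site_gqs)
--     site_qual = min(site_quals)
--
--     if len(site_alts) > 1:
--         site_genotype = '1/2'
--     elif site_genotypes[0] == HET:
--         site_genotype = '0/1'
--     else:
--         site_genotype = '1/1'
--
--     return site_ref, site_alts, site_qual, site_gq, site_genotype
-- ===== SOURCE B (Python) =====
-- DEL = 3
--
-- HET = 1
--
-- def get_site_record(all_records):
--     # single pass: running minima instead of lists of quals/gqs,
--     # only the first genotype is kept (it is all the genotype rule uses)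
--     records = iter(all_records)
--     ref0, alt0, gt0, qual0, gq0, t0 = next(records)
--     site_ref = ref0
--     site_alts = [alt0]
--     site_qual = qual0
--     site_gq = gq0
--     for ref_seq, alt_seq, genotype, qual, gq, rec_type in records:
--         site_alts.append(alt_seq)
--         site_qual = min(site_qual, qual)
--         site_gq = min(site_gq, gq)
--         if rec_type == DEL or site_ref == '':
--             site_ref = ref_seq
--
--     if len(site_alts) > 1:
--         site_genotype = '1/2'
--     elif gt0 == HET:
--         site_genotype = '0/1'
--     else:
--         site_genotype = '1/1'
--
--     return site_ref, site_alts, site_qual, site_gq, site_genotype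
-- ===== Notes on version B (the rewrite author's own statement) =====
-- stated objective: simpler
-- what changed: B is a single pass that keeps running minima of qual/gq and only the first genotype instead of A's two scans over all_records, three accumulated lists plus two min() calls at the end, and it drops A's always-empty ref_seq[len(ref_seq):] suffix append.
-- outside the precondition, e.g. on get_site_record([]): A raises ValueError, B raises StopIteration
import Mathlib
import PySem

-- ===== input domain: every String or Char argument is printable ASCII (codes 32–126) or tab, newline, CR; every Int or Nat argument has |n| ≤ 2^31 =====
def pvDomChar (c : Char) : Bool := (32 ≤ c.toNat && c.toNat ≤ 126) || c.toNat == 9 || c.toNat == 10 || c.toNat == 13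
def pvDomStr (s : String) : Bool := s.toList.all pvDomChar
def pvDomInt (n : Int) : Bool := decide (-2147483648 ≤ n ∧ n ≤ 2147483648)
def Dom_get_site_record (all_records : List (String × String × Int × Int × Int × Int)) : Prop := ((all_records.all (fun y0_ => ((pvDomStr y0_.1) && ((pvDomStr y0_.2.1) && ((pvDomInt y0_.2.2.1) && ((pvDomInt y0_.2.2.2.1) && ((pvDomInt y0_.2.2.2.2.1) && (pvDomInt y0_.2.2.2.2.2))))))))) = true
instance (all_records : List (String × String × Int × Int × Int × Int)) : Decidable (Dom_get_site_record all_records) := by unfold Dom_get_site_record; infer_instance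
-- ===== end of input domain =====

-- B replaces A's two scans over all_records (three accumulated lists + min() at the end,
-- plus a second pass that appends an always-empty slice) by ONE pass with running minima;
-- equal return value on every non-empty input (A raises ValueError on [], B StopIteration).

-- ===== PORT A =====
-- first loop of A: accumulates (site_ref, site_gqs, site_quals, site_genotypes)
def pvStepA1 (st : String × List Int × List Int × List Int)
    (record : String × String × Int × Int × Int × Int) : String × List Int × List Int × List Int :=
  match record with
  | (ref_seq, _alt_seq, genotype, qual, gq, rec_type) =>
    let site_gqs := st.2.1 ++ [gq]
    let site_quals := st.2.2.1 ++ [qual]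
    let site_genotypes := st.2.2.2 ++ [genotype]
    let site_ref := if rec_type = 3 then ref_seq else if st.1 = "" then ref_seq else st.1
    (site_ref, site_gqs, site_quals, site_genotypes)

-- second loop of A: appends alt_seq (possibly extended by ref_seq[len(ref_seq):])
def pvStepA2 (site_ref : String) (acc : List String)
    (record : String × String × Int × Int × Int × Int) : List String :=
  match record with
  | (ref_seq, alt_seq, _genotype, _qual, _gq, _rec_type) =>
    let alt_seq := if ref_seq ≠ site_ref ∧ PySem.Str.len site_ref > 1
      then alt_seq ++ PySem.Str.slice ref_seq (some (PySem.Str.len ref_seq)) none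
      else alt_seq
    acc ++ [alt_seq]

def get_site_record (all_records : List (String × String × Int × Int × Int × Int)) : String × List String × Int × Int × String :=
  let s1 := all_records.foldl pvStepA1 ("", ([], [], []))
  let site_ref := s1.1
  let site_alts := all_records.foldl (pvStepA2 site_ref) []
  -- min() raises ValueError on an empty list: Pre_ excludes all_records = [], .getD 0 is unreachable there
  let site_gq := ((PySem.List.min? s1.2.1 (fun x => x)).getD 0)
  let site_qual := ((PySem.List.min? s1.2.2.1 (fun x => x)).getD 0)
  let site_genotype :=
    if site_alts.length > 1 then "1/2"
    else if (PySem.List.pyGet? s1.2.2.2 0).getD 0 = 1 then "0/1"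
    else "1/1"
  (site_ref, site_alts, site_qual, site_gq, site_genotype)

-- ===== PORT B =====
-- B's single loop over the remaining records: running (site_ref, site_alts, site_qual, site_gq)
def pvStepB (st : String × List String × Int × Int)
    (record : String × String × Int × Int × Int × Int) : String × List String × Int × Int :=
  match record with
  | (ref_seq, alt_seq, _genotype, qual, gq, rec_type) =>
    (if rec_type = 3 ∨ st.1 = "" then ref_seq else st.1,
     st.2.1 ++ [alt_seq], min st.2.2.1 qual, min st.2.2.2 gq)

def get_site_record_alt (all_records : List (String × String × Int × Int × Int × Int)) : String × List String × Int × Int × String :=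
  match all_records with
  | [] => ("", [], 0, 0, "")  -- next(records) raises StopIteration in Python: outside Pre_
  | (ref0, alt0, gt0, qual0, gq0, _t0) :: records =>
    let st := records.foldl pvStepB (ref0, [alt0], qual0, gq0)
    let site_genotype :=
      if st.2.1.length > 1 then "1/2"
      else if gt0 = 1 then "0/1"
      else "1/1"
    (st.1, st.2.1, st.2.2.1, st.2.2.2, site_genotype)

-- ===== PRECONDITION & SPEC =====
-- Pre_ excludes only the empty list, on which A raises ValueError (min of empty sequence).
def Pre_get_site_record (all_records : List (String × String × Int × Int × Int × Int)) : Prop :=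
  all_records ≠ []
instance (all_records : List (String × String × Int × Int × Int × Int)) : Decidable (Pre_get_site_record all_records) := by unfold Pre_get_site_record; infer_instance

def pvWitness_get_site_record : (List (String × String × Int × Int × Int × Int)) :=
  [("A", "T", 1, 30, 40, 0)]

def Spec_get_site_record (all_records : List (String × String × Int × Int × Int × Int)) (out : String × List String × Int × Int × String) : Prop := out = get_site_record_alt all_records
instance (all_records : List (String × String × Int × Int × Int × Int)) (out : String × List String × Int × Int × String) : Decidable (Spec_get_site_record all_records out) := by unfold Spec_get_site_record; infer_instance

-- ===== CLAIM (what is proved, stated in full; the proofs are below) =====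
def Claim_equal_get_site_record : Prop := ∀ (all_records : List (String × String × Int × Int × Int × Int)), Dom_get_site_record all_records → Pre_get_site_record all_records → Spec_get_site_record all_records (get_site_record all_records)

-- ===== LEMMAS AND PROOFS =====

-- the suffix Python appends, ref_seq[len(ref_seq):], is always empty
theorem pv_slice_from_len (s : String) :
    PySem.Str.slice s (some (PySem.Str.len s)) none = "" := by
  have h : (PySem.Str.slice s (some (PySem.Str.len s)) none).toList = [] := by
    simp [PySem.Str.toList_slice, PySem.Str.len_eq, PySem.List.slice_from_natCast]
  exact String.toList_inj.mp (h.trans rfl)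

-- A's second loop just appends each record's alt_seq
theorem pv_foldA2 (site_ref : String) :
    ∀ (l : List (String × String × Int × Int × Int × Int)) (acc : List String),
    l.foldl (pvStepA2 site_ref) acc = acc ++ l.map (fun r => r.2.1) := by
  intro l
  induction l with
  | nil => simp
  | cons r t ih =>
    intro acc
    obtain ⟨ref_seq, alt_seq, g, q, gq, ty⟩ := r
    simp only [List.foldl_cons, pvStepA2, pv_slice_from_len, List.map_cons]
    rw [ih]
    split <;> simp

-- characterisation of A's first loop
def pvRefStep (s : String) (r : String × String × Int × Int × Int × Int) : String :=
  if r.2.2.2.2.2 = 3 then r.1 else if s = "" then r.1 else s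

theorem pv_foldA1 :
    ∀ (l : List (String × String × Int × Int × Int × Int)) (s : String) (gqs quals gts : List Int),
    l.foldl pvStepA1 (s, gqs, quals, gts) =
      (l.foldl pvRefStep s,
       gqs ++ l.map (fun r => r.2.2.2.2.1),
       quals ++ l.map (fun r => r.2.2.2.1),
       gts ++ l.map (fun r => r.2.2.1)) := by
  intro l
  induction l with
  | nil => simp
  | cons r t ih =>
    intro s gqs quals gts
    obtain ⟨ref_seq, alt_seq, g, q, gq, ty⟩ := r
    simp only [List.foldl_cons, pvStepA1, List.map_cons]
    rw [ih]
    simp [pvRefStep]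

-- characterisation of B's loop
theorem pv_foldB :
    ∀ (l : List (String × String × Int × Int × Int × Int)) (s : String) (alts : List String) (q g : Int),
    l.foldl pvStepB (s, alts, q, g) =
      (l.foldl pvRefStep s,
       alts ++ l.map (fun r => r.2.1),
       (l.map (fun r => r.2.2.2.1)).foldl min q,
       (l.map (fun r => r.2.2.2.2.1)).foldl min g) := by
  intro l
  induction l with
  | nil => simp
  | cons r t ih =>
    intro s alts q g
    obtain ⟨ref_seq, alt_seq, gt, qu, gq, ty⟩ := r
    simp only [List.foldl_cons, pvStepB, List.map_cons]
    rw [ih]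
    have : (if ty = 3 ∨ s = "" then ref_seq else s) = pvRefStep s (ref_seq, alt_seq, gt, qu, gq, ty) := by
      simp only [pvRefStep]
      split_ifs with h h1 h2 <;> tauto
    rw [this]
    simp

-- ===== VERDICT (by name: the statement is the Claim_ definition above) =====
theorem get_site_record_spec : Claim_equal_get_site_record := by
  intro all_records _hdom hpre
  unfold Spec_get_site_record
  match all_records, hpre with
  | (ref0, alt0, gt0, qual0, gq0, t0) :: rest, _ =>
    show get_site_record _ = _
    unfold get_site_record get_site_record_alt
    simp only [pv_foldA1, pv_foldB, pv_foldA2, List.foldl_cons, pvStepA1,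
      List.nil_append]
    have href : (if t0 = 3 then ref0 else if True then ref0 else "") = ref0 := by
      split_ifs <;> simp_all
    rw [href]
    simp only [pvStepA2, pv_slice_from_len]
    simp [PySem.List.min?_id_cons, PySem.List.pyGet?, PySem.List.pyIdx?]
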